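-- pv_equiv track=rewrite | github.com/CodingDojoTulsaMay2018/Tom_Reese | Python/python_fundamentals/functions_basic_2/functions_basic_2.py | tltv
-- ===== SOURCE A (Python) =====
-- def tltv(num1,num2):
--     q = []
--     i = num1
--     while i > 0:
--         if num1 == num2:
--             return('Jinx!')
--         else:
--             len(q) < num1
--             q.append(num2)
--             i-=1
--     return q
-- ===== SOURCE B (Python) =====
-- def tltv(num1, num2):
--     if num1 > 0 and num1 == num2:
--         return 'Jinx!'
--     # build [num2]*num1 by binary doubling of a chunk, O(log num1) iterations
--     out = []
--     chunk = [num2]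
--     n = num1
--     while n > 0:
--         if n & 1:
--             out = out + chunk
--         chunk = chunk + chunk
--         n >>= 1
--     return out
-- ===== Notes on version B (the rewrite author's own statement) =====
-- stated objective: alternative
-- what changed: Hoists the loop-invariant Jinx test out of the loop and replaces A's one-append-per-element while-loop by binary doubling: a chunk list is repeatedly doubled and appended according to the bits of num1, so the interpreted loop runs O(log num1) times with bulk list concatenations instead of num1 per-element appends.
-- outside the precondition, e.g. on tltv(3, 3): A returns 'Jinx!', B returns 'Jinx!'
import Mathlib
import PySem

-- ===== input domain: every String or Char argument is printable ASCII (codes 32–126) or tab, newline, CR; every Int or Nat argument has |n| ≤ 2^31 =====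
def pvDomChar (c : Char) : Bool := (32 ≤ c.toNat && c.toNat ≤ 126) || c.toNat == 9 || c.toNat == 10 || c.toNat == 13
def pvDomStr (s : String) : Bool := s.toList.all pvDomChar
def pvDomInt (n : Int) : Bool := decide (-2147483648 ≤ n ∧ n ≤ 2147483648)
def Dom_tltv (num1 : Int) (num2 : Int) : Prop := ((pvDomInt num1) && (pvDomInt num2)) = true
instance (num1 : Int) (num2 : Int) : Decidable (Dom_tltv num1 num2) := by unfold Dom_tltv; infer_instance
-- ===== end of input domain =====

-- B hoists the loop-invariant Jinx test out of the loop and builds the list by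
-- binary doubling over the bits of num1 instead of one append per element
-- (objective: alternative algorithm, same total cost).

-- ===== PORT A =====
-- Literal port of A's while-loop: state (q, i), append num2 and decrement i.
-- On the 'Jinx!' branch Python returns a string, not a list of ints; that branch
-- is outside Pre_tltv, and the port returns q there (never relied upon).
def tltvLoop (num1 : Int) (num2 : Int) (q : List Int) (i : Int) : List Int :=
  if h : i > 0 then
    if num1 = num2 then q   -- Python: return 'Jinx!' (excluded by Pre_tltv)
    else tltvLoop num1 num2 (q ++ [num2]) (i - 1)
  else q
termination_by i.toNat
decreasing_by omega

def tltv (num1 : Int) (num2 : Int) : List Int :=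
  tltvLoop num1 num2 [] num1

-- ===== PORT B =====
-- Source B's doubling loop; for n > 0, Python's `n & 1` is `n % 2 = 1` and
-- `n >>= 1` is floor division by 2, which for n > 0 coincides with Lean's n / 2.
def tltvAltLoop (num2 : Int) (n : Int) (chunk out : List Int) : List Int :=
  if h : n > 0 then
    tltvAltLoop num2 (n / 2) (chunk ++ chunk)
      (if n % 2 = 1 then out ++ chunk else out)
  else out
termination_by n.toNat
decreasing_by omega

def tltv_alt (num1 : Int) (num2 : Int) : List Int :=
  if num1 > 0 ∧ num1 = num2 then []   -- Python: return 'Jinx!' (excluded by Pre_tltv)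
  else tltvAltLoop num2 num1 [num2] []

-- ===== PRECONDITION & SPEC =====
-- Pre_ excludes num1 > 0 ∧ num1 = num2: there both Pythons return the string
-- 'Jinx!', which is not a value of the declared return type List Int.
def Pre_tltv (num1 : Int) (num2 : Int) : Prop := ¬ (num1 > 0 ∧ num1 = num2)
instance (num1 : Int) (num2 : Int) : Decidable (Pre_tltv num1 num2) := by unfold Pre_tltv; infer_instance
def pvWitness_tltv : Int × Int := (3, 5)

def Spec_tltv (num1 : Int) (num2 : Int) (out : List Int) : Prop := out = tltv_alt num1 num2
instance (num1 : Int) (num2 : Int) (out : List Int) : Decidable (Spec_tltv num1 num2 out) := by unfold Spec_tltv; infer_instance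

-- ===== CLAIM =====
def Claim_equal_tltv : Prop := ∀ (num1 : Int) (num2 : Int), Dom_tltv num1 num2 → Pre_tltv num1 num2 → Spec_tltv num1 num2 (tltv num1 num2)

-- ===== LEMMAS AND PROOFS =====
-- A's loop, when the Jinx branch never fires, appends i copies of num2.
theorem tltvLoop_ne (num1 num2 : Int) (h : num1 ≠ num2) :
    ∀ (i : Int) (q : List Int), tltvLoop num1 num2 q i = q ++ List.replicate i.toNat num2 := by
  intro i
  induction hn : i.toNat generalizing i with
  | zero =>
    intro q
    rw [tltvLoop]
    have : ¬ i > 0 := by omega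
    simp [this]
  | succ k ih =>
    intro q
    rw [tltvLoop]
    have hi : i > 0 := by omega
    have : (i - 1).toNat = k := by omega
    simp [hi, h, ih (i - 1) this, List.replicate_succ]

-- B's doubling loop invariant: with chunk = replicate m num2 it returns
-- out ++ replicate (n.toNat * m) num2.
theorem tltvAltLoop_eq (num2 : Int) :
    ∀ (n : Int) (m : Nat) (out : List Int),
      tltvAltLoop num2 n (List.replicate m num2) out
        = out ++ List.replicate (n.toNat * m) num2 := by
  intro n
  induction hn : n.toNat using Nat.strong_induction_on generalizing n with
  | _ N ih =>
    intro m out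
    rw [tltvAltLoop]
    by_cases hpos : n > 0
    · have hlt : (n / 2).toNat < N := by omega
      have hrep : List.replicate m num2 ++ List.replicate m num2
          = List.replicate (m + m) num2 := (List.replicate_add m m num2).symm
      have ihr := ih (n / 2).toNat hlt (n / 2) rfl (m + m)
      have hsplit : n.toNat * m = (if n % 2 = 1 then m else 0) + (n / 2).toNat * (m + m) := by
        have h2 : n.toNat = 2 * (n / 2).toNat + (if n % 2 = 1 then 1 else 0) := by
          split_ifs with h <;> omega
        rw [h2]; split_ifs <;> ring
      by_cases hodd : n % 2 = 1
      · simp only [hpos, dif_pos, hodd, if_pos, hrep, ihr]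
        rw [← hn, hsplit, if_pos hodd, List.replicate_add, List.append_assoc]
      · simp only [hpos, dif_pos, hodd, if_neg, if_false, hrep, ihr]
        rw [← hn, hsplit, if_neg hodd, zero_add]
    · have h0 : N = 0 := by omega
      simp [hpos, h0]

-- ===== VERDICT =====
theorem tltv_spec : Claim_equal_tltv := by
  intro num1 num2 _ hpre
  unfold Spec_tltv tltv tltv_alt
  by_cases h : num1 = num2
  · have h0 : ¬ num1 > 0 := fun hp => hpre ⟨hp, h⟩
    subst h
    rw [tltvLoop, tltvAltLoop]
    simp [h0]
  · have hB : tltvAltLoop num2 num1 [num2] [] = List.replicate num1.toNat num2 := by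
      have := tltvAltLoop_eq num2 num1 1 []
      simpa using this
    simp [tltvLoop_ne num1 num2 h, h, hB]
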